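-- pv_equiv track=rewrite | github.com/cash2one/pt | boss/finance/views/finance_table.py | get_zf_csv_first_info
-- ===== SOURCE A (Python) =====
-- import copy
--
-- def get_zf_csv_first_info(second_info, objs):
--     second_copy = copy.deepcopy(second_info)
--     first_info = [[],[],[]]
--     for obj in objs:
--         if obj[0] == "1":
--             if obj[5] == "I":
--                 first_info[0].append(obj)
--                 if "I" in second_info.keys():
--                     for second_obj in second_info["I"]:
--                         first_info[0].append(second_obj)
--             elif obj[5] == "O":
--                 first_info[1].append(obj)
--                 if "O" in second_info.keys():
--                     for second_obj in second_info["O"]: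
--                         first_info[1].append(second_obj)
--             elif obj[5] == "B":
--                 first_info[2].append(obj)
--                 if "B" in second_info.keys():
--                     for second_obj in second_info["B"]:
--                         first_info[2].append(second_obj)
--
--     return first_info
-- ===== SOURCE B (Python) =====
-- def get_zf_csv_first_info(second_info, objs):
--     def bucket(key):
--         out = []
--         for obj in objs:
--             if obj[0] == "1" and obj[5] == key:
--                 out.append(obj)
--                 out.extend(second_info.get(key, []))
--         return out
--     return [bucket("I"), bucket("O"), bucket("B")]
-- ===== Notes on version B (the rewrite author's own statement) =====
-- stated objective: simpler
-- what changed: Instead of one pass dispatching each obj into one of three branches of an if/elif chain over a mutable triple of lists, B builds the three buckets independently: one key-filtered scan per key ('I','O','B') collecting obj followed by second_info.get(key, []), and drops the unused deepcopy.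
import Mathlib
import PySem

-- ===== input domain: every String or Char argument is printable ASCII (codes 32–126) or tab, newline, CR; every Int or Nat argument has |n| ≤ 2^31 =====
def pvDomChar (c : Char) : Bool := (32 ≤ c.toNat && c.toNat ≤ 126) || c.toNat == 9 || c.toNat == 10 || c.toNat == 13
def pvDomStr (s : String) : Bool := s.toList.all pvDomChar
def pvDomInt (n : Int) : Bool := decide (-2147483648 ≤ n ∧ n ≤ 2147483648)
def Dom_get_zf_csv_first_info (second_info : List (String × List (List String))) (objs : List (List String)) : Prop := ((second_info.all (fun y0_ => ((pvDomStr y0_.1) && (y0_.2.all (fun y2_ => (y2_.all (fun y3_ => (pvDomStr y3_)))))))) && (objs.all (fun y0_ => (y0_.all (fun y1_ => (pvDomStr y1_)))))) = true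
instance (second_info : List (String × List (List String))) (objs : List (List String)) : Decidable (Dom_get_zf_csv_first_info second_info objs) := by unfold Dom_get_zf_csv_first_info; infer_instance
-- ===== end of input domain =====

-- B replaces A's single-pass if/elif dispatch over a mutable triple of buckets by three
-- independent key-filtered scans (one per key "I"/"O"/"B") and drops the unused deepcopy;
-- objective: simpler. Equivalence of return values is proved on Pre_ (inputs where A raises
-- no IndexError).

-- ===== PORT A =====
-- dict lookup (first match in the association list); used for 'k in second_info.keys()'
-- (isSome) and 'second_info[k]' (the value).
def pvFind (si : List (String × List (List String))) (k : String) : Option (List (List String)) :=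
  (si.find? (fun p => p.1 == k)).map (·.2)

-- one iteration of A's 'for obj in objs' loop on the triple first_info; obj[0]/obj[5] are
-- PySem.List.pyGetD (IndexError inputs are excluded by Pre_ below).
def pvStepA (si : List (String × List (List String)))
    (fi : List (List String) × List (List String) × List (List String)) (obj : List String) :
    List (List String) × List (List String) × List (List String) :=
  if PySem.List.pyGetD obj 0 "" == "1" then
    if PySem.List.pyGetD obj 5 "" == "I" then
      ((match pvFind si "I" with
        | some v => (fi.1 ++ [obj]) ++ v
        | none => fi.1 ++ [obj]), fi.2.1, fi.2.2)
    else if PySem.List.pyGetD obj 5 "" == "O" then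
      (fi.1, (match pvFind si "O" with
        | some v => (fi.2.1 ++ [obj]) ++ v
        | none => fi.2.1 ++ [obj]), fi.2.2)
    else if PySem.List.pyGetD obj 5 "" == "B" then
      (fi.1, fi.2.1, (match pvFind si "B" with
        | some v => (fi.2.2 ++ [obj]) ++ v
        | none => fi.2.2 ++ [obj]))
    else fi
  else fi

def get_zf_csv_first_info (second_info : List (String × List (List String))) (objs : List (List String)) : List (List (List String)) :=
  let fi := objs.foldl (pvStepA second_info) ([], [], [])
  [fi.1, fi.2.1, fi.2.2]

-- ===== PORT B =====
-- one iteration of B's inner 'for obj in objs' loop of bucket(key)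
def pvStepB (si : List (String × List (List String))) (key : String)
    (out : List (List String)) (obj : List String) : List (List String) :=
  if PySem.List.pyGetD obj 0 "" == "1" && PySem.List.pyGetD obj 5 "" == key then
    (out ++ [obj]) ++ (pvFind si key).getD []
  else out

def pvBucket (si : List (String × List (List String))) (objs : List (List String)) (key : String) : List (List String) :=
  objs.foldl (pvStepB si key) []

def get_zf_csv_first_info_alt (second_info : List (String × List (List String))) (objs : List (List String)) : List (List (List String)) :=
  [pvBucket second_info objs "I", pvBucket second_info objs "O", pvBucket second_info objs "B"]

-- ===== PRECONDITION & SPEC =====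
-- Pre_ excludes exactly the inputs on which Python A raises IndexError: an empty obj
-- (obj[0]) or an obj starting with "1" of length < 6 (obj[5]).
def Pre_get_zf_csv_first_info (second_info : List (String × List (List String))) (objs : List (List String)) : Prop :=
  ∀ obj ∈ objs, obj ≠ [] ∧ (obj.head? = some "1" → 6 ≤ obj.length)
instance (second_info : List (String × List (List String))) (objs : List (List String)) : Decidable (Pre_get_zf_csv_first_info second_info objs) := by unfold Pre_get_zf_csv_first_info; infer_instance

def pvWitness_get_zf_csv_first_info : (List (String × List (List String))) × List (List String) :=
  ([("I", [["s"]])], [["1", "a", "b", "c", "d", "I"], ["0"]])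

def Spec_get_zf_csv_first_info (second_info : List (String × List (List String))) (objs : List (List String)) (out : List (List (List String))) : Prop := out = get_zf_csv_first_info_alt second_info objs
instance (second_info : List (String × List (List String))) (objs : List (List String)) (out : List (List (List String))) : Decidable (Spec_get_zf_csv_first_info second_info objs out) := by unfold Spec_get_zf_csv_first_info; infer_instance

-- ===== CLAIM (what is proved, stated in full; the proofs are below) =====
def Claim_equal_get_zf_csv_first_info : Prop := ∀ (second_info : List (String × List (List String))) (objs : List (List String)), Dom_get_zf_csv_first_info second_info objs → Pre_get_zf_csv_first_info second_info objs → Spec_get_zf_csv_first_info second_info objs (get_zf_csv_first_info second_info objs)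

-- ===== LEMMAS AND PROOFS =====

lemma pvStepB_append (si : List (String × List (List String))) (key : String)
    (acc : List (List String)) (obj : List String) :
    pvStepB si key acc obj = acc ++ pvStepB si key [] obj := by
  unfold pvStepB; split <;> simp

lemma pvBucket_acc (si : List (String × List (List String))) (key : String) :
    ∀ (objs : List (List String)) (acc : List (List String)),
      objs.foldl (pvStepB si key) acc = acc ++ pvBucket si objs key
  | [], acc => by simp [pvBucket]
  | obj :: objs, acc => by
    simp only [pvBucket, List.foldl_cons]
    rw [pvBucket_acc si key objs (pvStepB si key acc obj),
        pvBucket_acc si key objs (pvStepB si key [] obj),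
        pvStepB_append, List.append_assoc]

lemma pvBucket_cons (si : List (String × List (List String))) (key : String)
    (obj : List String) (objs : List (List String)) :
    pvBucket si (obj :: objs) key = pvStepB si key [] obj ++ pvBucket si objs key := by
  unfold pvBucket
  rw [List.foldl_cons, pvBucket_acc]
  rfl

lemma pvMatch_eq (l : List (List String)) (o : List String) (x : Option (List (List String))) :
    (match x with
      | some v => (l ++ [o]) ++ v
      | none => l ++ [o]) = l ++ (o :: x.getD []) := by
  cases x <;> simp

lemma foldA_eq (si : List (String × List (List String))) :
    ∀ (objs : List (List String)) (a b c : List (List String)),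
      objs.foldl (pvStepA si) (a, b, c) =
        (a ++ pvBucket si objs "I", b ++ pvBucket si objs "O", c ++ pvBucket si objs "B")
  | [], a, b, c => by simp [pvBucket]
  | obj :: objs, a, b, c => by
    rw [List.foldl_cons]
    by_cases h0 : PySem.List.pyGetD obj 0 "" == "1"
    · by_cases h5I : PySem.List.pyGetD obj 5 "" == "I"
      · have h5 : PySem.List.pyGetD obj 5 "" = "I" := eq_of_beq h5I
        simp only [pvStepA, h0, h5I, if_pos, pvMatch_eq]
        rw [foldA_eq si objs]
        simp [pvBucket_cons, pvStepB, h0, h5]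
      · by_cases h5O : PySem.List.pyGetD obj 5 "" == "O"
        · have h5 : PySem.List.pyGetD obj 5 "" = "O" := eq_of_beq h5O
          simp only [pvStepA, h0, h5I, h5O, if_pos, if_neg, Bool.false_eq_true,
            not_false_eq_true, pvMatch_eq]
          rw [foldA_eq si objs]
          simp [pvBucket_cons, pvStepB, h0, h5]
        · by_cases h5B : PySem.List.pyGetD obj 5 "" == "B"
          · have h5 : PySem.List.pyGetD obj 5 "" = "B" := eq_of_beq h5B
            simp only [pvStepA, h0, h5I, h5O, h5B, if_pos, if_neg, Bool.false_eq_true,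
              not_false_eq_true, pvMatch_eq]
            rw [foldA_eq si objs]
            simp [pvBucket_cons, pvStepB, h0, h5]
          · simp only [pvStepA, h0, h5I, h5O, h5B, Bool.false_eq_true, if_neg,
              not_false_eq_true, if_pos]
            rw [foldA_eq si objs]
            simp [pvBucket_cons, pvStepB, h0, h5I, h5O, h5B]
    · simp only [pvStepA, h0, Bool.false_eq_true, if_neg, not_false_eq_true]
      rw [foldA_eq si objs]
      simp [pvBucket_cons, pvStepB, h0]

-- ===== VERDICT (by name: the statement is the Claim_ definition above) =====
theorem get_zf_csv_first_info_spec : Claim_equal_get_zf_csv_first_info := by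
  intro si objs _ _
  unfold Spec_get_zf_csv_first_info get_zf_csv_first_info get_zf_csv_first_info_alt
  rw [foldA_eq si objs]
  simp
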